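-- pv_equiv track=rewrite | github.com/Rhythamtech/rag-techniques | toonify_json.py | _needs_quote
-- ===== SOURCE A (Python) =====
-- def _needs_quote(s: str) -> bool:
--     # Minimal quoting rules (inspired by TOON description):
--     # quote when the string contains the delimiter ',' or newline,
--     # when it contains a double quote, or when it has leading/trailing whitespace.
--     if not isinstance(s, str):
--         return False
--     if s == "":
--         return True
--     if s[0].isspace() or s[-1].isspace():
--         return True
--     if any(ch in s for ch in [',', '\n', '\r', '"']):
--         return True
--     return False
-- ===== SOURCE B (Python) =====
-- FORBIDDEN = {',', '\n', '\r', '"'}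
--
-- def _needs_quote(s: str) -> bool:
--     if not isinstance(s, str):
--         return False
--     if s == "":
--         return True
--     if s[0].isspace() or s[-1].isspace():
--         return True
--     return any(c in FORBIDDEN for c in s)
-- ===== Notes on version B (the rewrite author's own statement) =====
-- stated objective: idiomatic
-- what changed: Replaced the per-needle scan any(ch in s for ch in [',','\n','\r','"']) (one full substring search per delimiter) by a single pass over the characters of s testing each against a precomputed forbidden set.
import Mathlib
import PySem

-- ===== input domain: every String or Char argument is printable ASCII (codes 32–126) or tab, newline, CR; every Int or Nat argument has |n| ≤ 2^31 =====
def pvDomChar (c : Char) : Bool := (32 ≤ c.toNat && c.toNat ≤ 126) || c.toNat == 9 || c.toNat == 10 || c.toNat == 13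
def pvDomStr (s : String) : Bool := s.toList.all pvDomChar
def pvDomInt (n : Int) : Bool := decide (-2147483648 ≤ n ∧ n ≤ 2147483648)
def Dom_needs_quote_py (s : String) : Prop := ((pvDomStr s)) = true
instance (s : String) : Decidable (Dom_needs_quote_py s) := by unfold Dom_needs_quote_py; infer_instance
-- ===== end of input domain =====

-- B replaces A's per-delimiter substring scans by one pass over s against a precomputed forbidden set (idiomatic; same result).

-- ===== PORT A =====
-- literal transliteration of _needs_quote: empty → True; leading/trailing space → True;
-- then any(ch in s for ch in [',','\n','\r','"'])
def needs_quote_py (s : String) : Bool :=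
  if s.toList = [] then true
  else if PySem.Chars.isspace ((PySem.Str.pyGet? s 0).getD ' ')
          || PySem.Chars.isspace ((PySem.Str.pyGet? s (-1)).getD ' ') then true
  else if [',', '\n', '\r', '"'].any (fun ch => PySem.Chars.isIn [ch] s.toList) then true
  else false

-- ===== PORT B =====
def pvForbidden : PySem.Set Char := PySem.Set.ofList [',', '\n', '\r', '"']

def needs_quote_py_alt (s : String) : Bool :=
  if s.toList = [] then true
  else if PySem.Chars.isspace ((PySem.Str.pyGet? s 0).getD ' ')
          || PySem.Chars.isspace ((PySem.Str.pyGet? s (-1)).getD ' ') then true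
  else s.toList.any (fun c => PySem.Set.contains pvForbidden c)

-- ===== PRECONDITION & SPEC =====
def Spec_needs_quote_py (s : String) (out : Bool) : Prop := out = needs_quote_py_alt s
instance (s : String) (out : Bool) : Decidable (Spec_needs_quote_py s out) := by unfold Spec_needs_quote_py; infer_instance

-- ===== CLAIM (what is proved, stated in full; the proofs are below) =====
def Claim_equal_needs_quote_py : Prop := ∀ (s : String), Dom_needs_quote_py s → Spec_needs_quote_py s (needs_quote_py s)

-- ===== LEMMAS AND PROOFS =====

theorem infix_singleton_iff_mem {α : Type} (a : α) (l : List α) : [a] <:+: l ↔ a ∈ l := by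
  constructor
  · intro h
    exact (List.singleton_sublist).1 h.sublist
  · intro h
    obtain ⟨l₁, l₂, rfl⟩ := List.append_of_mem h
    exact ⟨l₁, l₂, by simp⟩

theorem isIn_singleton (a : Char) (l : List Char) :
    PySem.Chars.isIn [a] l = l.contains a := by
  rcases h : l.contains a with _ | _
  · rw [PySem.Chars.isIn_eq_false_iff, infix_singleton_iff_mem]
    simpa using h
  · rw [PySem.Chars.isIn_iff_infix, infix_singleton_iff_mem]
    simpa using h

theorem needle_scan_eq (l : List Char) :
    ([',', '\n', '\r', '"'].any (fun ch => PySem.Chars.isIn [ch] l))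
      = l.any (fun c => PySem.Set.contains pvForbidden c) := by
  simp only [List.any_cons, List.any_nil, isIn_singleton, Bool.or_false]
  rw [Bool.eq_iff_iff]
  simp only [Bool.or_eq_true, List.any_eq_true, List.contains_eq_mem, decide_eq_true_eq,
    pvForbidden, PySem.Set.contains_eq_listContains]
  constructor
  · rintro (h | h | h | h) <;> exact ⟨_, h, by decide⟩
  · rintro ⟨c, hc, hmem⟩
    fin_cases hmem <;> simp_all

-- ===== VERDICT (by name: the statement is the Claim_ definition above) =====
theorem needs_quote_py_spec : Claim_equal_needs_quote_py := by
  intro s _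
  unfold Spec_needs_quote_py needs_quote_py needs_quote_py_alt
  split_ifs with h1 h2 h3
  · rfl
  · rfl
  · exact (needle_scan_eq s.toList ▸ h3).symm
  · rw [← needle_scan_eq]
    exact (Bool.not_eq_true _ |>.mp (by exact_mod_cast h3)).symm
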